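-- pv_equiv track=rewrite | github.com/Balazzzska/aoc2024 | 22/22-p2.py | evolve_secret_number
-- ===== SOURCE A (Python) =====
-- def evolve_secret_number(number, num_iterations):
--     best_price_per_sequence = {}
--
--     prev_last_digit = number % 10
--     past_4_changes = []
--
--     for i in range(num_iterations):
--         mul64 = number * 64
--         # MIXING; bitwise xor
--         number = number ^ mul64
--         # PRUNING; modulo 16777216
--         number = number % 16777216
--
--         div32 = number // 32
--         # MIXING; bitwise xor
--         number = number ^ div32
--         # PRUNING; modulo 16777216
--         number = number % 16777216
--
--         mul2048 = number * 2048
--         # MIXING; bitwise xor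
--         number = number ^ mul2048
--         # PRUNING; modulo 16777216
--         number = number % 16777216
--
--         last_digit = number % 10
--
--         past_4_changes.append(last_digit - prev_last_digit)
--         if len(past_4_changes) > 4:
--             past_4_changes.pop(0)
--
--         if len(past_4_changes) == 4:
--             sequence = tuple(past_4_changes)
--             if sequence not in best_price_per_sequence:
--                 best_price_per_sequence[sequence] = 0
--
--             best_price_per_sequence[sequence] = max(
--                 best_price_per_sequence[sequence], last_digit
--             )
--
--         prev_last_digit = last_digit
--
--     return best_price_per_sequence
-- ===== SOURCE B (Python) =====
-- def _next(n):
--     n = (n ^ (n * 64)) % 16777216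
--     n = (n ^ (n // 32)) % 16777216
--     n = (n ^ (n * 2048)) % 16777216
--     return n
--
-- def evolve_secret_number(number, num_iterations):
--     # phase 1: the full price stream
--     prices = []
--     n = number
--     for _ in range(num_iterations):
--         n = _next(n)
--         prices.append(n % 10)
--     # phase 2: consecutive changes
--     changes = [b - a for a, b in zip([number % 10] + prices, prices)]
--     # phase 3: windows of 4 changes via shifted zips, keyed against the price after the window
--     best = {}
--     for seq, price in zip(zip(changes, changes[1:], changes[2:], changes[3:]), prices[3:]):
--         best[seq] = max(best.get(seq, 0), price)
--     return best
-- ===== Notes on version B (the rewrite author's own statement) =====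
-- stated objective: simpler
-- what changed: A's single interleaved loop that maintains a sliding 4-change window and updates the dict as it evolves the secret is replaced by three separate phases: build the full price list, derive the change list, then scan windows obtained by zipping four shifted copies of the change list against the prices after each window.
import Mathlib
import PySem

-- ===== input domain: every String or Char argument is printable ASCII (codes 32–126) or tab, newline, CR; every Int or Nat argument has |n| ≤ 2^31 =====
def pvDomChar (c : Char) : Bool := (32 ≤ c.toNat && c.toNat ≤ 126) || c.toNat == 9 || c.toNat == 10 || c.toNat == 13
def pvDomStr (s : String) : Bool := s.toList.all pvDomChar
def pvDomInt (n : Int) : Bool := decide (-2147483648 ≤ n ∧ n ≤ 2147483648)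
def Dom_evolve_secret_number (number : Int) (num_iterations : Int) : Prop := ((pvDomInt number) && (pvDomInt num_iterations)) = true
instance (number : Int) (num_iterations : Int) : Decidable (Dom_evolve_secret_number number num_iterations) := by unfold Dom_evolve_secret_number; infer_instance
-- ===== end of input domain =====

-- B re-implements A as three separate phases (price list, change list, windows by zipping shifted
-- change lists) instead of A's single interleaved loop with a maintained sliding window; objective: simpler.

-- ===== PORT A =====
-- the loop body of A, step for step; `past1.drop 1` is `past_4_changes.pop(0)` (past1 is nonempty there)
def pvALoop (best : PySem.Dict (List Int) Int) (prev : Int) (past : List Int)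
    (number : Int) (k : Nat) : PySem.Dict (List Int) Int :=
  match k with
  | 0 => best
  | Nat.succ k =>
    let mul64 := number * 64
    let n1 := PySem.Int.mod (PySem.Int.bxor number mul64) 16777216
    let div32 := PySem.Int.floordiv n1 32
    let n2 := PySem.Int.mod (PySem.Int.bxor n1 div32) 16777216
    let mul2048 := n2 * 2048
    let n3 := PySem.Int.mod (PySem.Int.bxor n2 mul2048) 16777216
    let last_digit := PySem.Int.mod n3 10
    let past1 := past ++ [last_digit - prev]
    let past2 := if past1.length > 4 then past1.drop 1 else past1
    let best1 :=
      if past2.length = 4 then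
        let b0 := if best.contains past2 then best else best.insert past2 0
        b0.insert past2 (max (b0.getD past2 0) last_digit)
      else best
    pvALoop best1 last_digit past2 n3 k

def evolve_secret_number (number : Int) (num_iterations : Int) : List (List Int × Int) :=
  (pvALoop PySem.Dict.empty (PySem.Int.mod number 10) [] number num_iterations.toNat).items

-- ===== PORT B =====
-- Source B's `_next`
def pvNext (n : Int) : Int :=
  let a := PySem.Int.mod (PySem.Int.bxor n (n * 64)) 16777216
  let b := PySem.Int.mod (PySem.Int.bxor a (PySem.Int.floordiv a 32)) 16777216
  PySem.Int.mod (PySem.Int.bxor b (b * 2048)) 16777216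

-- phase 1: build the price list by appending
def pvPricesLoop (n : Int) (k : Nat) (prices : List Int) : List Int :=
  match k with
  | 0 => prices
  | Nat.succ k =>
    let m := pvNext n
    pvPricesLoop m k (prices ++ [PySem.Int.mod m 10])

-- zip of four lists (python `zip(changes, changes[1:], changes[2:], changes[3:])`)
def pvZip4 (a b c d : List Int) : List (Int × Int × Int × Int) :=
  match a, b, c, d with
  | x :: a, y :: b, z :: c, w :: d => (x, y, z, w) :: pvZip4 a b c d
  | _, _, _, _ => []

-- loop body of phase 3: `best[seq] = max(best.get(seq, 0), price)` (the 4-tuple key as a 4-element list)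
def pvUpdate (best : PySem.Dict (List Int) Int) (sp : (Int × Int × Int × Int) × Int) :
    PySem.Dict (List Int) Int :=
  let key := [sp.1.1, sp.1.2.1, sp.1.2.2.1, sp.1.2.2.2]
  best.insert key (max (best.getD key 0) sp.2)

def evolve_secret_number_alt (number : Int) (num_iterations : Int) : List (List Int × Int) :=
  let prices := pvPricesLoop number num_iterations.toNat []
  let changes := (((PySem.Int.mod number 10) :: prices).zip prices).map (fun ab => ab.2 - ab.1)
  let best := ((pvZip4 changes (changes.drop 1) (changes.drop 2) (changes.drop 3)).zip
      (prices.drop 3)).foldl pvUpdate PySem.Dict.empty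
  best.items

-- ===== PRECONDITION & SPEC =====
def Spec_evolve_secret_number (number : Int) (num_iterations : Int) (out : List (List Int × Int)) : Prop := out = evolve_secret_number_alt number num_iterations
instance (number : Int) (num_iterations : Int) (out : List (List Int × Int)) : Decidable (Spec_evolve_secret_number number num_iterations out) := by unfold Spec_evolve_secret_number; infer_instance

-- ===== CLAIM (what is proved, stated in full; the proofs are below) =====
def Claim_equal_evolve_secret_number : Prop := ∀ (number : Int) (num_iterations : Int), Dom_evolve_secret_number number num_iterations → Spec_evolve_secret_number number num_iterations (evolve_secret_number number num_iterations)

-- ===== LEMMAS AND PROOFS =====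

-- cons-shaped view of B's price stream
def pvPrices (n : Int) (k : Nat) : List Int :=
  match k with
  | 0 => []
  | Nat.succ k => PySem.Int.mod (pvNext n) 10 :: pvPrices (pvNext n) k

theorem pvPricesLoop_eq (n : Int) (k : Nat) (acc : List Int) :
    pvPricesLoop n k acc = acc ++ pvPrices n k := by
  induction k generalizing n acc with
  | zero => simp [pvPricesLoop, pvPrices]
  | succ k ih => simp [pvPricesLoop, pvPrices, ih]

-- cons-shaped view of B's change list
def pvDiffs (prev : Int) (ps : List Int) : List Int :=
  match ps with
  | [] => []
  | p :: ps => (p - prev) :: pvDiffs p ps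

theorem pvChanges_eq (prev : Int) (ps : List Int) :
    ((prev :: ps).zip ps).map (fun ab => ab.2 - ab.1) = pvDiffs prev ps := by
  induction ps generalizing prev with
  | nil => simp [pvDiffs]
  | cons p ps ih => simp [pvDiffs, ih]

-- A's two-step dict update (conditional insert 0, then overwrite with the max) collapses to B's one-step update
theorem pvUpdStep_eq (best : PySem.Dict (List Int) Int) (key : List Int) (p : Int) :
    ((if best.contains key then best else best.insert key 0).insert key
      (max ((if best.contains key then best else best.insert key 0).getD key 0) p))
      = best.insert key (max (best.getD key 0) p) := by
  by_cases h : best.contains key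
  · simp [h]
  · simp only [h, Bool.false_eq_true, if_false]
    rw [PySem.Dict.insert_insert_self, PySem.Dict.getD_insert_self]
    rw [PySem.Dict.getD_of_not_contains (h := by simpa using h)]

-- B's window/price pairs over a change list cs and a price list ps
def pvPairs (cs ps : List Int) : List ((Int × Int × Int × Int) × Int) :=
  (pvZip4 cs (cs.drop 1) (cs.drop 2) (cs.drop 3)).zip ps

-- one step of A's loop with a full (length-4) window, phrased via pvNext
theorem pvALoop_steady_step (best : PySem.Dict (List Int) Int) (prev w0 w1 w2 w3 number : Int) (k : Nat) :
    pvALoop best prev [w0, w1, w2, w3] number (Nat.succ k) =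
      pvALoop (best.insert [w1, w2, w3, PySem.Int.mod (pvNext number) 10 - prev]
                (max (best.getD [w1, w2, w3, PySem.Int.mod (pvNext number) 10 - prev] 0)
                  (PySem.Int.mod (pvNext number) 10)))
        (PySem.Int.mod (pvNext number) 10)
        [w1, w2, w3, PySem.Int.mod (pvNext number) 10 - prev]
        (pvNext number) k := by
  conv_lhs => rw [pvALoop]
  simp only [pvNext]
  norm_num [pvUpdStep_eq]

-- one step of A's loop with a window of length 0, 1, 2 (window grows, no update fires)
theorem pvALoop_grow0 (best : PySem.Dict (List Int) Int) (prev number : Int) (k : Nat) :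
    pvALoop best prev [] number (Nat.succ k) =
      pvALoop best (PySem.Int.mod (pvNext number) 10)
        [PySem.Int.mod (pvNext number) 10 - prev] (pvNext number) k := by
  conv_lhs => rw [pvALoop]
  simp only [pvNext]
  norm_num

theorem pvALoop_grow1 (best : PySem.Dict (List Int) Int) (prev a number : Int) (k : Nat) :
    pvALoop best prev [a] number (Nat.succ k) =
      pvALoop best (PySem.Int.mod (pvNext number) 10)
        [a, PySem.Int.mod (pvNext number) 10 - prev] (pvNext number) k := by
  conv_lhs => rw [pvALoop]
  simp only [pvNext]
  norm_num

theorem pvALoop_grow2 (best : PySem.Dict (List Int) Int) (prev a b number : Int) (k : Nat) :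
    pvALoop best prev [a, b] number (Nat.succ k) =
      pvALoop best (PySem.Int.mod (pvNext number) 10)
        [a, b, PySem.Int.mod (pvNext number) 10 - prev] (pvNext number) k := by
  conv_lhs => rw [pvALoop]
  simp only [pvNext]
  norm_num

-- one step with a window of length 3: the window fills and the first update fires
theorem pvALoop_fire3 (best : PySem.Dict (List Int) Int) (prev a b c number : Int) (k : Nat) :
    pvALoop best prev [a, b, c] number (Nat.succ k) =
      pvALoop (best.insert [a, b, c, PySem.Int.mod (pvNext number) 10 - prev]
                (max (best.getD [a, b, c, PySem.Int.mod (pvNext number) 10 - prev] 0)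
                  (PySem.Int.mod (pvNext number) 10)))
        (PySem.Int.mod (pvNext number) 10)
        [a, b, c, PySem.Int.mod (pvNext number) 10 - prev]
        (pvNext number) k := by
  conv_lhs => rw [pvALoop]
  simp only [pvNext]
  norm_num [pvUpdStep_eq]

-- steady state: with a full window, A's remaining loop is B's fold over the remaining window/price pairs
theorem pvSteady (k : Nat) :
    ∀ (number prev w0 w1 w2 w3 : Int) (best : PySem.Dict (List Int) Int),
    pvALoop best prev [w0, w1, w2, w3] number k =
      (pvPairs ([w1, w2, w3] ++ pvDiffs prev (pvPrices number k)) (pvPrices number k)).foldl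
        pvUpdate best := by
  induction k with
  | zero => intro number prev w0 w1 w2 w3 best; simp [pvALoop, pvPrices, pvDiffs, pvPairs, pvZip4]
  | succ k ih =>
    intro number prev w0 w1 w2 w3 best
    rw [pvALoop_steady_step, ih]
    simp [pvPrices, pvDiffs, pvPairs, pvZip4, pvUpdate]

-- warm-up: with a window of length ≤ 3, A's loop is B's fold over the pairs, prices offset by the missing changes
theorem pvWarm (k : Nat) :
    ∀ (number prev : Int) (past : List Int) (best : PySem.Dict (List Int) Int),
    past.length ≤ 3 →
    pvALoop best prev past number k =
      (pvPairs (past ++ pvDiffs prev (pvPrices number k))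
        ((pvPrices number k).drop (3 - past.length))).foldl pvUpdate best := by
  induction k with
  | zero => intro number prev past best _; simp [pvALoop, pvPrices, pvDiffs, pvPairs]
  | succ k ih =>
    intro number prev past best hlen
    match past with
    | [] =>
      rw [pvALoop_grow0, ih _ _ _ _ (by simp)]
      simp [pvPrices, pvDiffs, pvPairs]
    | [a] =>
      rw [pvALoop_grow1, ih _ _ _ _ (by simp)]
      simp [pvPrices, pvDiffs, pvPairs]
    | [a, b] =>
      rw [pvALoop_grow2, ih _ _ _ _ (by simp)]
      simp [pvPrices, pvDiffs, pvPairs]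
    | [a, b, c] =>
      rw [pvALoop_fire3, pvSteady]
      simp [pvPrices, pvDiffs, pvPairs, pvZip4, pvUpdate]
    | _ :: _ :: _ :: _ :: _ => simp at hlen; omega

-- ===== VERDICT (by name: the statement is the Claim_ definition above) =====
theorem evolve_secret_number_spec : Claim_equal_evolve_secret_number := by
  intro number num_iterations _
  unfold Spec_evolve_secret_number evolve_secret_number evolve_secret_number_alt
  rw [pvPricesLoop_eq]
  simp only [List.nil_append]
  rw [pvChanges_eq, pvWarm _ _ _ _ _ (by simp)]
  simp [pvPairs]
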